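-- pv_equiv track=rewrite | github.com/siva-kumar-python/leetcode_problems | 3803-count-residue-prefixes/3803-count-residue-prefixes.py | residuePrefixes
-- ===== SOURCE A (Python) =====
-- def residuePrefixes(s: str) -> int:
--     count=0
--     seen = set()
--     prefix=''
--     for i in s:
--         prefix+=i
--         mod=len(prefix)%3
--         if i not in seen :
--             seen.add(i)
--         if mod==len(seen) and len(seen):
--             count+=1
--     return count
-- ===== SOURCE B (Python) =====
-- def _cnt(lo, hi, v):
--     # number of integers L in [lo, hi] with L % 3 == v
--     if v > 2:
--         return 0
--     return (hi - v) // 3 - (lo - 1 - v) // 3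
--
-- def _iv_sum(firsts, v, n):
--     # sum over the intervals of constant distinct-count v, v+1, ...
--     if not firsts:
--         return 0
--     lo = firsts[0]
--     hi = firsts[1] - 1 if len(firsts) > 1 else n
--     return _cnt(lo, hi, v) + _iv_sum(firsts[1:], v + 1, n)
--
-- def residuePrefixes(s: str) -> int:
--     seen = set()
--     firsts = []
--     for pos, ch in enumerate(s, 1):
--         if ch not in seen:
--             seen.add(ch)
--             firsts.append(pos)
--     return _iv_sum(firsts, 1, len(s))
-- ===== Notes on version B (the rewrite author's own statement) =====
-- stated objective: faster
-- what changed: A checks length%3 == distinct-count for every prefix, growing a string and a set as it goes; B records first-occurrence positions once, partitions prefix lengths into intervals of constant distinct count, and counts each interval with a closed-form residue-mod-3 formula.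
import Mathlib
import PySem

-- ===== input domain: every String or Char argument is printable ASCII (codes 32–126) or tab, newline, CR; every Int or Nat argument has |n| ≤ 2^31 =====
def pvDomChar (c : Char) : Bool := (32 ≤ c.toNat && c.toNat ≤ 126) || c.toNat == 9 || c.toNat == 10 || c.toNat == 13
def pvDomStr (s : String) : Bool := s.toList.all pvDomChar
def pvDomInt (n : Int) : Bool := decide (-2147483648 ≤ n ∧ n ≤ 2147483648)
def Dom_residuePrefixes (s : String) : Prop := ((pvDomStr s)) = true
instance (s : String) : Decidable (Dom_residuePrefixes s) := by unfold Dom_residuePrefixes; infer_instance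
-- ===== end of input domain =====

-- B replaces A's per-prefix scan by a first-occurrence partition of prefix lengths into
-- constant-distinct-count intervals, each counted by a closed-form residue formula (alternative decomposition).

-- ===== PORT A =====
def rpStepA (st : Int × PySem.Set Char × List Char) (i : Char) : Int × PySem.Set Char × List Char :=
  let pre := st.2.2 ++ [i]
  let md := PySem.Int.mod ((pre.length : Nat) : Int) 3
  let seen := if PySem.Set.contains st.2.1 i then st.2.1 else PySem.Set.add st.2.1 i
  let cnt := if md = PySem.Set.len seen ∧ PySem.Set.len seen ≠ 0 then st.1 + 1 else st.1
  (cnt, seen, pre)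

def residuePrefixes (s : String) : Int :=
  (s.toList.foldl rpStepA (0, PySem.Set.empty, [])).1

-- ===== PORT B =====
def rpCnt (lo hi v : Int) : Int :=
  if v > 2 then 0
  else PySem.Int.floordiv (hi - v) 3 - PySem.Int.floordiv (lo - 1 - v) 3

def rpIvSum : List Int → Int → Int → Int
  | [], _, _ => 0
  | lo :: rest, v, n =>
    let hi := match rest with
      | f2 :: _ => f2 - 1
      | [] => n
    rpCnt lo hi v + rpIvSum rest (v + 1) n

def rpFirstsStep (st : PySem.Set Char × List Int) (p : Int × Char) : PySem.Set Char × List Int :=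
  if PySem.Set.contains st.1 p.2 then st
  else (PySem.Set.add st.1 p.2, st.2 ++ [p.1])

def residuePrefixes_alt (s : String) : Int :=
  let st := (PySem.List.enumerate s.toList 1).foldl rpFirstsStep (PySem.Set.empty, [])
  rpIvSum st.2 1 (PySem.Str.len s)

-- ===== PRECONDITION & SPEC =====
def Spec_residuePrefixes (s : String) (out : Int) : Prop := out = residuePrefixes_alt s
instance (s : String) (out : Int) : Decidable (Spec_residuePrefixes s out) := by unfold Spec_residuePrefixes; infer_instance

-- ===== CLAIM (what is proved, stated in full; the proofs are below) =====
def Claim_equal_residuePrefixes : Prop := ∀ (s : String), Dom_residuePrefixes s → Spec_residuePrefixes s (residuePrefixes s)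

-- ===== LEMMAS AND PROOFS =====

-- distinct-character count of a prefix
def rpDD (l : List Char) : Int := ((PySem.Set.ofList l).length : Int)

-- sum of f over the k consecutive integers starting at lo
def rpSum (lo : Int) : Nat → (Int → Int) → Int
  | 0, _ => 0
  | k+1, f => f lo + rpSum (lo+1) k f

-- A's loop body as a recursion over the remaining characters, carrying the processed prefix
def rpSpecA : List Char → List Char → Int
  | _, [] => 0
  | p, i :: cs =>
    (if PySem.Int.mod (((p ++ [i]).length : Nat) : Int) 3 = rpDD (p ++ [i]) ∧ rpDD (p ++ [i]) ≠ 0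
     then 1 else 0) + rpSpecA (p ++ [i]) cs

-- first-occurrence positions (1-indexed) as a recursion
def rpFirsts (seen : PySem.Set Char) (pos : Int) : List Char → List Int
  | [] => []
  | i :: cs =>
    if PySem.Set.contains seen i then rpFirsts seen (pos + 1) cs
    else pos :: rpFirsts (PySem.Set.add seen i) (pos + 1) cs

def rpG (cs : List Char) (L : Int) : Int :=
  if PySem.Int.mod L 3 = rpDD (cs.take L.toNat) then 1 else 0

lemma rpSum_congr (k : Nat) : ∀ (lo : Int) (f g : Int → Int),
    (∀ L, lo ≤ L → L < lo + k → f L = g L) → rpSum lo k f = rpSum lo k g := by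
  induction k with
  | zero => intro lo f g _; rfl
  | succ k ih =>
    intro lo f g h
    simp only [rpSum]
    rw [h lo le_rfl (by push_cast; omega), ih (lo+1) f g (fun L h1 h2 => h L (by omega) (by push_cast at h2 ⊢; omega))]

lemma rpSum_split (a : Nat) : ∀ (b : Nat) (lo : Int) (f : Int → Int),
    rpSum lo (a + b) f = rpSum lo a f + rpSum (lo + a) b f := by
  induction a with
  | zero => intro b lo f; simp [rpSum]
  | succ a ih =>
    intro b lo f
    have : a + 1 + b = (a + b) + 1 := by omega
    rw [this]
    simp only [rpSum]
    rw [ih b (lo+1) f]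
    have : lo + 1 + (a : Int) = lo + ((a : Int) + 1) := by ring
    rw [this]
    push_cast
    ring

lemma rpSum_zero (k : Nat) : ∀ (lo : Int), rpSum lo k (fun _ => 0) = 0 := by
  induction k with
  | zero => intro lo; rfl
  | succ k ih => intro lo; simp only [rpSum]; rw [ih (lo+1)]; ring

lemma rpCnt_eq (k : Nat) : ∀ (lo v : Int), 1 ≤ v →
    rpCnt lo (lo + k - 1) v = rpSum lo k (fun L => if PySem.Int.mod L 3 = v then 1 else 0) := by
  intro lo v hv
  by_cases hv2 : v > 2
  · simp only [rpCnt, if_pos hv2]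
    rw [rpSum_congr k lo _ (fun _ => 0)
        (fun L _ _ => by
          rw [if_neg]
          have := PySem.Int.mod_lt (a := L) (b := 3) (by norm_num)
          omega),
      rpSum_zero k lo]
  · induction k generalizing lo with
    | zero =>
      simp only [rpSum, rpCnt, if_neg hv2]
      have h0 : lo + ((0:Nat) : Int) - 1 - v = lo - 1 - v := by push_cast; ring
      rw [h0, sub_self]
    | succ k ih =>
      have h3 : (0:Int) < 3 := by norm_num
      have hstep : rpCnt lo (lo + ((k:Int)+1) - 1) v
          = (if PySem.Int.mod lo 3 = v then 1 else 0) + rpCnt (lo+1) ((lo+1) + (k:Int) - 1) v := by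
        simp only [rpCnt, if_neg hv2, PySem.Int.floordiv_eq_ediv_of_pos h3,
          PySem.Int.mod_eq_emod_of_pos h3]
        split_ifs with h
        · omega
        · omega
      have e1 : lo + ((k:Nat) + 1 : Nat) - 1 = lo + ((k:Int)+1) - 1 := by push_cast; ring
      rw [e1, hstep, ih (lo+1)]
      rfl

lemma rp_ofList_snoc (p : List Char) (i : Char) :
    PySem.Set.ofList (p ++ [i]) = PySem.Set.add (PySem.Set.ofList p) i := by
  rw [PySem.Set.ofList_eq_foldl, PySem.Set.ofList_eq_foldl, List.foldl_append]
  rfl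

lemma rp_foldA (cs : List Char) : ∀ (c : Int) (p : List Char),
    (cs.foldl rpStepA (c, PySem.Set.ofList p, p)).1 = c + rpSpecA p cs := by
  induction cs with
  | nil => intro c p; simp [rpSpecA]
  | cons i cs ih =>
    intro c p
    have hseen : (if PySem.Set.contains (PySem.Set.ofList p) i then PySem.Set.ofList p
        else PySem.Set.add (PySem.Set.ofList p) i) = PySem.Set.ofList (p ++ [i]) := by
      rw [rp_ofList_snoc]
      by_cases h : PySem.Set.contains (PySem.Set.ofList p) i
      · rw [if_pos h]; simp only [PySem.Set.add, PySem.Set.contains] at h ⊢; rw [if_pos h]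
      · rw [if_neg h]
    have hstep : rpStepA (c, PySem.Set.ofList p, p) i
        = ((if PySem.Int.mod (((p ++ [i]).length : Nat) : Int) 3 = rpDD (p ++ [i]) ∧ rpDD (p ++ [i]) ≠ 0
            then c + 1 else c), PySem.Set.ofList (p ++ [i]), p ++ [i]) := by
      simp only [rpStepA, hseen, PySem.Set.len, rpDD]
      rfl
    rw [List.foldl_cons, hstep]
    split_ifs with h
    · rw [ih (c+1) (p ++ [i])]; simp only [rpSpecA, if_pos h]; ring
    · rw [ih c (p ++ [i])]; simp only [rpSpecA, if_neg h]; ring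

lemma rpDD_pos (p : List Char) (i : Char) : 0 < rpDD (p ++ [i]) := by
  have : i ∈ PySem.Set.ofList (p ++ [i]) := by
    rw [PySem.Set.mem_ofList]; simp
  have := List.length_pos_of_mem this
  unfold rpDD
  omega

lemma rpSpecA_eq_rpSum (cs : List Char) : ∀ (p : List Char),
    rpSpecA p cs = rpSum ((p.length : Int) + 1) cs.length (rpG (p ++ cs)) := by
  induction cs with
  | nil => intro p; rfl
  | cons i cs ih =>
    intro p
    simp only [rpSpecA, List.length_cons, rpSum]
    have hassoc : p ++ i :: cs = (p ++ [i]) ++ cs := by simp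
    have htake : (p ++ i :: cs).take ((((p.length : Int) + 1)).toNat) = p ++ [i] := by
      rw [hassoc, List.take_left']
      simp
    have hhead : (if PySem.Int.mod (((p ++ [i]).length : Nat) : Int) 3 = rpDD (p ++ [i]) ∧ rpDD (p ++ [i]) ≠ 0
        then (1:Int) else 0) = rpG (p ++ i :: cs) ((p.length : Int) + 1) := by
      unfold rpG
      rw [htake]
      have hne : rpDD (p ++ [i]) ≠ 0 := by have := rpDD_pos p i; omega
      have harg : (((p ++ [i]).length : Nat) : Int) = (p.length : Int) + 1 := by simp
      rw [harg]
      simp [hne]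
    rw [hhead, ih (p ++ [i]), hassoc]
    have : ((p ++ [i]).length : Int) + 1 = (p.length : Int) + 1 + 1 := by simp
    rw [this]

lemma rpFirsts_lb (cs : List Char) : ∀ (seen : PySem.Set Char) (pos f : Int),
    f ∈ rpFirsts seen pos cs → pos ≤ f := by
  induction cs with
  | nil => intro seen pos f h; simp [rpFirsts] at h
  | cons i cs ih =>
    intro seen pos f h
    simp only [rpFirsts] at h
    split_ifs at h with hc
    · have := ih seen (pos+1) f h; omega
    · rcases List.mem_cons.mp h with h | h
      · omega
      · have := ih (PySem.Set.add seen i) (pos+1) f h; omega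

lemma rpFirsts_ub (cs : List Char) : ∀ (seen : PySem.Set Char) (pos f : Int),
    f ∈ rpFirsts seen pos cs → f < pos + cs.length := by
  induction cs with
  | nil => intro seen pos f h; simp [rpFirsts] at h
  | cons i cs ih =>
    intro seen pos f h
    simp only [rpFirsts] at h
    split_ifs at h with hc
    · have := ih seen (pos+1) f h; simp only [List.length_cons]; push_cast at this ⊢; omega
    · rcases List.mem_cons.mp h with h | h
      · simp only [List.length_cons, h]; push_cast; omega
      · have := ih (PySem.Set.add seen i) (pos+1) f h
        simp only [List.length_cons]; push_cast at this ⊢; omega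

lemma rpFirsts_sorted (cs : List Char) : ∀ (seen : PySem.Set Char) (pos : Int),
    (rpFirsts seen pos cs).Pairwise (· < ·) := by
  induction cs with
  | nil => intro seen pos; simp [rpFirsts]
  | cons i cs ih =>
    intro seen pos
    simp only [rpFirsts]
    split_ifs with hc
    · exact ih seen (pos+1)
    · refine List.pairwise_cons.mpr ⟨fun f hf => ?_, ih (PySem.Set.add seen i) (pos+1)⟩
      have := rpFirsts_lb cs (PySem.Set.add seen i) (pos+1) f hf
      omega

lemma rpFirsts_count (cs : List Char) : ∀ (seen : PySem.Set Char) (pos : Int) (m : Nat),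
    m ≤ cs.length →
    ((rpFirsts seen pos cs).filter (fun f => decide (f ≤ pos + (m : Int) - 1))).length + seen.length
      = ((cs.take m).foldl PySem.Set.add seen).length := by
  induction cs with
  | nil =>
    intro seen pos m hm
    have hm0 : m = 0 := by simpa using hm
    subst hm0
    simp [rpFirsts]
  | cons i cs ih =>
    intro seen pos m hm
    cases m with
    | zero =>
      have hfil : (rpFirsts seen pos (i :: cs)).filter (fun f => decide (f ≤ pos + ((0:Nat) : Int) - 1)) = [] := by
        refine List.filter_eq_nil_iff.mpr (fun f hf => ?_)
        have := rpFirsts_lb (i :: cs) seen pos f hf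
        simp only [decide_eq_true_eq]
        push_cast
        omega
      rw [hfil]
      simp
    | succ mm =>
      have hmm : mm ≤ cs.length := by simpa using hm
      simp only [List.take_succ_cons, List.foldl_cons, rpFirsts]
      split_ifs with hc
      · have hadd : PySem.Set.add seen i = seen := by
          simp only [PySem.Set.add, PySem.Set.contains] at hc ⊢
          rw [if_pos hc]
        rw [hadd]
        have harg : pos + ((mm + 1 : Nat) : Int) - 1 = (pos + 1) + ((mm : Nat) : Int) - 1 := by
          push_cast; ring
        rw [harg]
        exact ih seen (pos + 1) mm hmm
      · have hadd : PySem.Set.add seen i = seen ++ [i] := by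
          simp only [PySem.Set.add, PySem.Set.contains] at hc ⊢
          rw [if_neg hc]
        have hkeep : decide (pos ≤ pos + ((mm + 1 : Nat) : Int) - 1) = true := by
          simp only [decide_eq_true_eq]; push_cast; omega
        rw [List.filter_cons]
        simp only [hkeep, if_true, List.length_cons]
        have harg : pos + ((mm + 1 : Nat) : Int) - 1 = (pos + 1) + ((mm : Nat) : Int) - 1 := by
          push_cast; ring
        rw [harg, hadd]
        have := ih (PySem.Set.add seen i) (pos + 1) mm hmm
        rw [hadd] at this
        simp only [List.length_append, List.length_cons, List.length_nil] at this
        omega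

lemma rpDD_filter (cs : List Char) (m : Nat) (hm : m ≤ cs.length) :
    rpDD (cs.take m)
      = (((rpFirsts PySem.Set.empty 1 cs).filter (fun f => decide (f ≤ (m : Int)))).length : Int) := by
  have h := rpFirsts_count cs PySem.Set.empty 1 m hm
  have harg : 1 + (m : Int) - 1 = (m : Int) := by ring
  rw [harg] at h
  have hempty : (PySem.Set.empty : PySem.Set Char).length = 0 := rfl
  rw [hempty] at h
  unfold rpDD
  have hof : PySem.Set.ofList (cs.take m) = (cs.take m).foldl PySem.Set.add PySem.Set.empty := rfl
  rw [hof]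
  omega

lemma rp_foldB (cs : List Char) : ∀ (seen : PySem.Set Char) (acc : List Int) (pos : Int),
    ((PySem.List.enumerate cs pos).foldl rpFirstsStep (seen, acc)).2 = acc ++ rpFirsts seen pos cs := by
  induction cs with
  | nil => intro seen acc pos; simp [PySem.List.enumerate, rpFirsts]
  | cons i cs ih =>
    intro seen acc pos
    rw [PySem.List.enumerate_cons, List.foldl_cons]
    simp only [rpFirsts, rpFirstsStep]
    split_ifs with hc
    · exact ih seen acc (pos + 1)
    · rw [ih (PySem.Set.add seen i) (acc ++ [pos]) (pos + 1)]
      simp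

lemma rpIvSum_eq (fs : List Int) : ∀ (f1 v n : Int) (d : Int → Int),
    1 ≤ v →
    ((f1 :: fs).Pairwise (· < ·)) →
    (∀ f ∈ f1 :: fs, f ≤ n) →
    (∀ L, f1 ≤ L → L ≤ n → d L = v + ((fs.filter (fun f => decide (f ≤ L))).length : Int)) →
    rpIvSum (f1 :: fs) v n
      = rpSum f1 (n - f1 + 1).toNat (fun L => if PySem.Int.mod L 3 = d L then 1 else 0) := by
  induction fs with
  | nil =>
    intro f1 v n d hv hpw hb hd
    have hf1n : f1 ≤ n := hb f1 (by simp)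
    show rpCnt f1 n v + 0 = _
    rw [add_zero]
    have hcnt := rpCnt_eq (n - f1 + 1).toNat f1 v hv
    have he : f1 + (((n - f1 + 1).toNat) : Int) - 1 = n := by omega
    rw [he] at hcnt
    rw [hcnt]
    apply rpSum_congr
    intro L h1 h2
    have hLn : L ≤ n := by omega
    rw [hd L h1 hLn]
    simp
  | cons f2 fs ih =>
    intro f1 v n d hv hpw hb hd
    have h12 : f1 < f2 := (List.pairwise_cons.mp hpw).1 f2 (by simp)
    have hf2n : f2 ≤ n := hb f2 (by simp)
    have hpw2 := (List.pairwise_cons.mp hpw).2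
    show rpCnt f1 (f2 - 1) v + rpIvSum (f2 :: fs) (v + 1) n = _
    have htail := ih f2 (v + 1) n d (by omega) hpw2
        (fun f hf => hb f (List.mem_cons_of_mem _ hf))
        (fun L h1 h2 => by
          have hle : decide (f2 ≤ L) = true := by simp only [decide_eq_true_eq]; omega
          rw [hd L (by omega) h2, List.filter_cons]
          simp only [hle, if_true, List.length_cons]
          push_cast; ring)
    rw [htail]
    have hcnt := rpCnt_eq (f2 - f1).toNat f1 v hv
    have he : f1 + (((f2 - f1).toNat) : Int) - 1 = f2 - 1 := by omega
    rw [he] at hcnt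
    rw [hcnt]
    have hcong : rpSum f1 (f2 - f1).toNat (fun L => if PySem.Int.mod L 3 = v then 1 else 0)
        = rpSum f1 (f2 - f1).toNat (fun L => if PySem.Int.mod L 3 = d L then 1 else 0) := by
      apply rpSum_congr
      intro L h1 h2
      have hLf2 : L < f2 := by omega
      have hfil : (f2 :: fs).filter (fun f => decide (f ≤ L)) = [] := by
        refine List.filter_eq_nil_iff.mpr (fun f hf => ?_)
        have hge : f2 ≤ f := by
          rcases List.mem_cons.mp hf with h | h
          · omega
          · have := (List.pairwise_cons.mp hpw2).1 f h; omega
        simp only [decide_eq_true_eq]; omega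
      have hdv := hd L h1 (by omega)
      rw [hfil] at hdv
      simp only [List.length_nil, Nat.cast_zero, add_zero] at hdv
      rw [hdv]
    rw [hcong]
    have hsplit := rpSum_split (f2 - f1).toNat (n - f2 + 1).toNat f1
        (fun L => if PySem.Int.mod L 3 = d L then 1 else 0)
    have he2 : f1 + (((f2 - f1).toNat) : Int) = f2 := by omega
    rw [he2] at hsplit
    rw [← hsplit]
    congr 1
    omega

-- ===== VERDICT (by name: the statement is the Claim_ definition above) =====
theorem residuePrefixes_spec : Claim_equal_residuePrefixes := by
  unfold Claim_equal_residuePrefixes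
  intro s _
  unfold Spec_residuePrefixes
  have hA : residuePrefixes s = rpSum 1 s.toList.length (rpG s.toList) := by
    unfold residuePrefixes
    have h0 : (PySem.Set.empty : PySem.Set Char) = PySem.Set.ofList [] := rfl
    rw [h0, rp_foldA s.toList 0 [], rpSpecA_eq_rpSum]
    simp
  have hB : residuePrefixes_alt s
      = rpIvSum (rpFirsts PySem.Set.empty 1 s.toList) 1 (s.toList.length : Int) := by
    simp only [residuePrefixes_alt, PySem.Str.len_eq]
    rw [rp_foldB s.toList PySem.Set.empty [] 1]
    simp
  rw [hA, hB]
  cases hcs : s.toList with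
  | nil => simp [rpFirsts, rpIvSum, rpSum]
  | cons c cs =>
    have hfirst : rpFirsts PySem.Set.empty 1 (c :: cs)
        = 1 :: rpFirsts (PySem.Set.add PySem.Set.empty c) (1 + 1) cs := rfl
    rw [hfirst]
    have hn1 : (1:Int) ≤ ((c :: cs).length : Int) := by
      rw [List.length_cons]; push_cast; omega
    have key := rpIvSum_eq (rpFirsts (PySem.Set.add PySem.Set.empty c) (1 + 1) cs)
        1 1 ((c :: cs).length : Int) (fun L => rpDD ((c :: cs).take L.toNat)) le_rfl
        (by rw [← hfirst]; exact rpFirsts_sorted (c :: cs) PySem.Set.empty 1)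
        (by
          intro f hf
          rw [← hfirst] at hf
          have := rpFirsts_ub (c :: cs) PySem.Set.empty 1 f hf
          omega)
        (by
          intro L h1 h2
          have hm : L.toNat ≤ (c :: cs).length := by omega
          have hdf := rpDD_filter (c :: cs) L.toNat hm
          have hLc : ((L.toNat : Nat) : Int) = L := by omega
          rw [hLc, hfirst] at hdf
          rw [List.filter_cons] at hdf
          have hone : decide ((1:Int) ≤ L) = true := by simp only [decide_eq_true_eq]; omega
          simp only [hone, if_true, List.length_cons] at hdf
          show rpDD ((c :: cs).take L.toNat) = _
          rw [hdf]
          push_cast; ring)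
    rw [key]
    have hk : ((((c :: cs).length : Int) - 1 + 1).toNat) = (c :: cs).length := by omega
    rw [hk]
    rfl
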